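-- pv_equiv track=rewrite | github.com/PavloDd/AlgoDataStructuresLabs | lab$Algo4v/main.py | update_elements
-- ===== SOURCE A (Python) =====
-- def update_elements(matrix, zero_indices):
--     rows = len(matrix)
--     cols = len(matrix[0])
--
--     def is_in_zero_indices(row, col):
--         return (row, col) in zero_indices
--
--     for i in range(rows):
--         for j in range(cols):
--             if is_in_zero_indices(i, j):
--                 for row_offset in range(-1, 2):
--                     for col_offset in range(-1, 2):
--                         new_row, new_col = i + row_offset, j + col_offset
--                         if 0 <= new_row < rows and 0 <= new_col < cols and not is_in_zero_indices(new_row, new_col):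
--                             matrix[new_row][new_col] = 0
--
--     return matrix
-- ===== SOURCE B (Python) =====
-- def update_elements(matrix, zero_indices):
--     rows = len(matrix)
--     cols = len(matrix[0])
--     zset = set(zero_indices)
--     result = [row[:] for row in matrix]
--     for i, j in zset:
--         if 0 <= i < rows and 0 <= j < cols:
--             for ni in range(max(i - 1, 0), min(i + 2, rows)):
--                 for nj in range(max(j - 1, 0), min(j + 2, cols)):
--                     if (ni, nj) not in zset:
--                         result[ni][nj] = 0
--     return result
-- ===== Notes on version B (the rewrite author's own statement) =====
-- stated objective: faster
-- what changed: A scans every cell of the matrix and does a linear list-membership test per cell (mutating in place); B builds a hash set of zero_indices once, copies the rows, and zeroes only the in-range neighbours of each in-range zero cell.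
import Mathlib
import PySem

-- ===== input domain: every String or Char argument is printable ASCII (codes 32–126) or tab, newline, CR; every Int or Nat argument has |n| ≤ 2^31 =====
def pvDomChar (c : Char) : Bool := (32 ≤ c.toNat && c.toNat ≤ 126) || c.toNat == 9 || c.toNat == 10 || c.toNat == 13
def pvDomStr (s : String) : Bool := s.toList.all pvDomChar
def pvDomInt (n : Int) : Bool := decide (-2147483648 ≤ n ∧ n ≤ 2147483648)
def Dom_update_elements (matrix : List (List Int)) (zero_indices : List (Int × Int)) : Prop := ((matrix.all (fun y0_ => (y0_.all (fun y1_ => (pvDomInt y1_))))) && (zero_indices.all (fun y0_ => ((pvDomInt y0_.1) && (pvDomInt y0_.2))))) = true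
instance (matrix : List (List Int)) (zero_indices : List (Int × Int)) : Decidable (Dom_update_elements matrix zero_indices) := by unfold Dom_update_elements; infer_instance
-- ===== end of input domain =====

-- B visits only the zero cells (a hash set built once) and zeroes their in-range
-- neighbours, instead of A's scan of every cell with list-membership tests; the
-- equivalence is about the RETURN value only (A mutates `matrix` in place, B returns
-- a new matrix built from row copies).

-- ===== PORT A =====
-- matrix[r][c] = 0; exact for the guarded writes both programs make (0 ≤ r < rows,
-- 0 ≤ c < cols, and inside Pre_update_elements the row is long enough).
def pvZeroCell (m : List (List Int)) (r c : Int) : List (List Int) :=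
  m.set r.toNat ((m.getD r.toNat []).set c.toNat 0)

def update_elements (matrix : List (List Int)) (zero_indices : List (Int × Int)) : List (List Int) :=
  let rows : Int := matrix.length
  let cols : Int := (matrix.headD []).length
  (PySem.List.pyRange 0 rows 1).foldl (fun m i =>
    (PySem.List.pyRange 0 cols 1).foldl (fun m j =>
      if (i, j) ∈ zero_indices then
        (PySem.List.pyRange (-1) 2 1).foldl (fun m ro =>
          (PySem.List.pyRange (-1) 2 1).foldl (fun m co =>
            if 0 ≤ i + ro ∧ i + ro < rows ∧ 0 ≤ j + co ∧ j + co < cols ∧ (i + ro, j + co) ∉ zero_indices then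
              pvZeroCell m (i + ro) (j + co)
            else m) m) m
      else m) m) matrix

-- ===== PORT B =====
def update_elements_alt (matrix : List (List Int)) (zero_indices : List (Int × Int)) : List (List Int) :=
  let rows : Int := matrix.length
  let cols : Int := (matrix.headD []).length
  let zset : PySem.Set (Int × Int) := PySem.Set.ofList zero_indices
  -- result = [row[:] for row in matrix]: fresh copies, value-equal to matrix
  let result := matrix
  zset.foldl (fun res p =>
    if 0 ≤ p.1 ∧ p.1 < rows ∧ 0 ≤ p.2 ∧ p.2 < cols then
      (PySem.List.pyRange (max (p.1 - 1) 0) (min (p.1 + 2) rows) 1).foldl (fun res ni =>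
        (PySem.List.pyRange (max (p.2 - 1) 0) (min (p.2 + 2) cols) 1).foldl (fun res nj =>
          if (ni, nj) ∉ zset then pvZeroCell res ni nj else res) res) res
    else res) result

-- ===== PRECONDITION & SPEC =====
-- Pre_ is exactly where the Python A returns: the matrix is nonempty (else len(matrix[0])
-- raises IndexError) and every guarded neighbour write of an in-range zero cell lands
-- inside the actual row (else matrix[r][c] = 0 raises IndexError on a short ragged row).
def Pre_update_elements (matrix : List (List Int)) (zero_indices : List (Int × Int)) : Prop :=
  matrix ≠ [] ∧ ∀ p ∈ zero_indices,
    (0 ≤ p.1 ∧ p.1 < (matrix.length : Int) ∧ 0 ≤ p.2 ∧ p.2 < ((matrix.headD []).length : Int)) →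
    ∀ di ∈ ([-1, 0, 1] : List Int), ∀ dj ∈ ([-1, 0, 1] : List Int),
      (0 ≤ p.1 + di ∧ p.1 + di < (matrix.length : Int) ∧ 0 ≤ p.2 + dj ∧
        p.2 + dj < ((matrix.headD []).length : Int) ∧ (p.1 + di, p.2 + dj) ∉ zero_indices) →
      p.2 + dj < ((matrix.getD (p.1 + di).toNat []).length : Int)

instance (matrix : List (List Int)) (zero_indices : List (Int × Int)) : Decidable (Pre_update_elements matrix zero_indices) := by unfold Pre_update_elements; infer_instance

def pvWitness_update_elements : List (List Int) × (List (Int × Int)) := ([[1, 2], [3, 4]], [(0, 0)])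

def Spec_update_elements (matrix : List (List Int)) (zero_indices : List (Int × Int)) (out : List (List Int)) : Prop := out = update_elements_alt matrix zero_indices
instance (matrix : List (List Int)) (zero_indices : List (Int × Int)) (out : List (List Int)) : Decidable (Spec_update_elements matrix zero_indices out) := by unfold Spec_update_elements; infer_instance

-- ===== CLAIM (what is proved, stated in full; the proofs are below) =====
def Claim_equal_update_elements : Prop := ∀ (matrix : List (List Int)) (zero_indices : List (Int × Int)), Dom_update_elements matrix zero_indices → Pre_update_elements matrix zero_indices → Spec_update_elements matrix zero_indices (update_elements matrix zero_indices)

-- ===== LEMMAS AND PROOFS =====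

-- the cell (a, b) of m, defaulting to 0 out of range
def pvCell (m : List (List Int)) (a b : Nat) : Int := (m.getD a []).getD b 0

-- one guarded write of A, as a step over a quadruple (i, j, ro, co)
def pvStep (zs : List (Int × Int)) (rows cols : Int) (m : List (List Int)) (q : Int × Int × Int × Int) : List (List Int) :=
  if (q.1, q.2.1) ∈ zs ∧ 0 ≤ q.1 + q.2.2.1 ∧ q.1 + q.2.2.1 < rows ∧ 0 ≤ q.2.1 + q.2.2.2 ∧ q.2.1 + q.2.2.2 < cols ∧ (q.1 + q.2.2.1, q.2.1 + q.2.2.2) ∉ zs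
  then pvZeroCell m (q.1 + q.2.2.1) (q.2.1 + q.2.2.2) else m

def pvQuads (rows cols : Int) : List (Int × Int × Int × Int) :=
  (PySem.List.pyRange 0 rows 1).flatMap (fun i =>
    (PySem.List.pyRange 0 cols 1).flatMap (fun j =>
      ([(-1 : Int), 0, 1].flatMap (fun ro => [(-1 : Int), 0, 1].map (fun co => (i, j, ro, co))))))

-- one guarded write of B, over the neighbour position (ni, nj)
def pvStepB (zs : List (Int × Int)) (m : List (List Int)) (w : Int × Int) : List (List Int) :=
  if (w.1, w.2) ∉ PySem.Set.ofList zs then pvZeroCell m w.1 w.2 else m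

-- the in-range neighbour positions B visits for one member p of the zero set
def pvNbrList (rows cols : Int) (p : Int × Int) : List (Int × Int) :=
  if 0 ≤ p.1 ∧ p.1 < rows ∧ 0 ≤ p.2 ∧ p.2 < cols then
    (PySem.List.pyRange (max (p.1 - 1) 0) (min (p.1 + 2) rows) 1).flatMap (fun ni =>
      (PySem.List.pyRange (max (p.2 - 1) 0) (min (p.2 + 2) cols) 1).map (fun nj => (ni, nj)))
  else []

-- "cell (a, b) is zeroed": an in-range zero cell lies within distance 1, and (a, b) is not a zero cell
def pvHit (matrix : List (List Int)) (zs : List (Int × Int)) (a b : Nat) : Prop :=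
  ∃ di dj : Int, (di = -1 ∨ di = 0 ∨ di = 1) ∧ (dj = -1 ∨ dj = 0 ∨ dj = 1) ∧
    ((a : Int) + di, (b : Int) + dj) ∈ zs ∧ 0 ≤ (a : Int) + di ∧ (a : Int) + di < (matrix.length : Int) ∧
    0 ≤ (b : Int) + dj ∧ (b : Int) + dj < ((matrix.headD []).length : Int)

lemma pvRowZero (l : List Int) (i j : Nat) :
    (l.set i 0)[j]?.getD 0 = if i = j then 0 else l[j]?.getD 0 := by
  rw [List.getElem?_set]
  by_cases h1 : i = j
  · subst h1
    by_cases h2 : i < l.length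
    · simp [h2]
    · simp [h2]
  · simp [h1]

lemma pvCell_zero (m : List (List Int)) (r c : Int) (a b : Nat) :
    pvCell (pvZeroCell m r c) a b = if r.toNat = a ∧ c.toNat = b then 0 else pvCell m a b := by
  unfold pvCell pvZeroCell
  simp only [List.getD_eq_getElem?_getD]
  by_cases ha : r.toNat = a
  · subst ha
    by_cases hlt : r.toNat < m.length
    · rw [List.getElem?_set, if_pos rfl, if_pos hlt, Option.getD_some, pvRowZero]
      by_cases hc : c.toNat = b <;> simp [hc]
    · rw [List.set_eq_of_length_le (by omega)]
      rw [List.getElem?_eq_none_iff.mpr (by omega : m.length ≤ r.toNat)]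
      simp
  · rw [List.getElem?_set, if_neg ha]
    simp [ha]

-- pointwise value of any fold of guarded zero-writes
lemma pvCell_foldWrites {α : Type} (g : α → Prop) [DecidablePred g] (rf cf : α → Int)
    (L : List α) (m : List (List Int)) (a b : Nat) :
    pvCell (L.foldl (fun m x => if g x then pvZeroCell m (rf x) (cf x) else m) m) a b =
      if ∃ x ∈ L, g x ∧ (rf x).toNat = a ∧ (cf x).toNat = b then 0 else pvCell m a b := by
  induction L generalizing m with
  | nil => simp
  | cons x L ih =>
    rw [List.foldl_cons, ih]
    by_cases hrest : ∃ y ∈ L, g y ∧ (rf y).toNat = a ∧ (cf y).toNat = b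
    · rw [if_pos hrest, if_pos (hrest.elim fun y hy => ⟨y, List.mem_cons_of_mem _ hy.1, hy.2⟩)]
    · rw [if_neg hrest]
      by_cases hg : g x
      · rw [if_pos hg, pvCell_zero]
        by_cases ht : (rf x).toNat = a ∧ (cf x).toNat = b
        · rw [if_pos ht, if_pos ⟨x, List.mem_cons_self, hg, ht⟩]
        · rw [if_neg ht, if_neg]
          rintro ⟨y, hy, hg', ht'⟩
          rcases List.mem_cons.mp hy with rfl | hmem
          · exact ht ht'
          · exact hrest ⟨y, hmem, hg', ht'⟩
      · rw [if_neg hg, if_neg]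
        rintro ⟨y, hy, hg', ht'⟩
        rcases List.mem_cons.mp hy with rfl | hmem
        · exact hg hg'
        · exact hrest ⟨y, hmem, hg', ht'⟩

-- any fold of guarded zero-writes preserves the outer length and every row length
lemma pvShape_foldWrites {α : Type} (g : α → Prop) [DecidablePred g] (rf cf : α → Int)
    (L : List α) (m : List (List Int)) :
    (L.foldl (fun m x => if g x then pvZeroCell m (rf x) (cf x) else m) m).length = m.length ∧
      ∀ a : Nat, ((L.foldl (fun m x => if g x then pvZeroCell m (rf x) (cf x) else m) m).getD a []).length = (m.getD a []).length := by
  induction L generalizing m with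
  | nil => simp
  | cons x L ih =>
    rw [List.foldl_cons]
    refine ⟨(ih _).1.trans ?_, fun a => ((ih _).2 a).trans ?_⟩
    · unfold pvZeroCell
      split <;> simp
    · unfold pvZeroCell
      split
      · simp only [List.getD_eq_getElem?_getD, List.getElem?_set]
        split_ifs with h1 h2
        · subst h1; simp
        · subst h1
          rw [List.getElem?_eq_none_iff.mpr (by omega)]
        · rfl
      · rfl

lemma pvOffs : PySem.List.pyRange (-1) 2 1 = [-1, 0, 1] := by decide

lemma pvInner_eq (zs : List (Int × Int)) (rows cols i j : Int) (m : List (List Int)) :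
    (if (i, j) ∈ zs then
       (PySem.List.pyRange (-1) 2 1).foldl (fun m ro =>
         (PySem.List.pyRange (-1) 2 1).foldl (fun m co =>
           if 0 ≤ i + ro ∧ i + ro < rows ∧ 0 ≤ j + co ∧ j + co < cols ∧ (i + ro, j + co) ∉ zs then
             pvZeroCell m (i + ro) (j + co)
           else m) m) m
     else m)
    = ([(-1 : Int), 0, 1].flatMap (fun ro => [(-1 : Int), 0, 1].map (fun co => (i, j, ro, co)))).foldl (pvStep zs rows cols) m := by
  rw [pvOffs]
  by_cases hmem : (i, j) ∈ zs
  · simp [pvStep, hmem, List.foldl]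
  · simp [pvStep, hmem, List.foldl]

lemma pvA_eq_foldQuads (matrix : List (List Int)) (zs : List (Int × Int)) :
    update_elements matrix zs =
      (pvQuads matrix.length (matrix.headD []).length).foldl
        (pvStep zs matrix.length (matrix.headD []).length) matrix := by
  unfold update_elements pvQuads
  simp only [List.foldl_flatMap]
  congr 1
  funext m i
  congr 1
  funext m j
  exact pvInner_eq zs _ _ i j m

lemma pvB_eq_foldWrites (matrix : List (List Int)) (zs : List (Int × Int)) :
    update_elements_alt matrix zs =
      ((PySem.Set.ofList zs).flatMap (pvNbrList matrix.length (matrix.headD []).length)).foldl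
        (pvStepB zs) matrix := by
  unfold update_elements_alt
  simp only [List.foldl_flatMap]
  congr 1
  funext res p
  unfold pvNbrList pvStepB
  by_cases h : 0 ≤ p.1 ∧ p.1 < (matrix.length : Int) ∧ 0 ≤ p.2 ∧ p.2 < ((matrix.headD []).length : Int)
  · rw [if_pos h, if_pos h, List.foldl_flatMap]
    congr 1
    funext res ni
    rw [List.foldl_map]
  · rw [if_neg h, if_neg h, List.foldl_nil]

lemma pvMem_quads (rows cols : Int) (q : Int × Int × Int × Int) :
    q ∈ pvQuads rows cols ↔ ∃ i j ro co, q = (i, j, ro, co) ∧ 0 ≤ i ∧ i < rows ∧ 0 ≤ j ∧ j < cols ∧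
      (ro = -1 ∨ ro = 0 ∨ ro = 1) ∧ (co = -1 ∨ co = 0 ∨ co = 1) := by
  simp only [pvQuads, List.mem_flatMap, List.mem_map, PySem.List.mem_pyRange_one]
  constructor
  · rintro ⟨i, ⟨hi0, hi1⟩, j, ⟨hj0, hj1⟩, ro, hro, co, hco, rfl⟩
    exact ⟨i, j, ro, co, rfl, hi0, hi1, hj0, hj1, by simpa using hro, by simpa using hco⟩
  · rintro ⟨i, j, ro, co, rfl, hi0, hi1, hj0, hj1, hro, hco⟩
    exact ⟨i, ⟨hi0, hi1⟩, j, ⟨hj0, hj1⟩, ro, by simpa using hro, co, by simpa using hco, rfl⟩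

lemma pvA_cond (matrix : List (List Int)) (zs : List (Int × Int)) (a b : Nat)
    (ha : a < matrix.length) :
    (∃ q ∈ pvQuads (matrix.length : Int) ((matrix.headD []).length : Int),
       ((q.1, q.2.1) ∈ zs ∧ 0 ≤ q.1 + q.2.2.1 ∧ q.1 + q.2.2.1 < (matrix.length : Int) ∧
        0 ≤ q.2.1 + q.2.2.2 ∧ q.2.1 + q.2.2.2 < ((matrix.headD []).length : Int) ∧
        (q.1 + q.2.2.1, q.2.1 + q.2.2.2) ∉ zs) ∧
       (q.1 + q.2.2.1).toNat = a ∧ (q.2.1 + q.2.2.2).toNat = b)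
    ↔ ((b : Int) < ((matrix.headD []).length : Int) ∧ ((a : Int), (b : Int)) ∉ zs ∧ pvHit matrix zs a b) := by
  constructor
  · rintro ⟨q, hq, ⟨hmem, h1, h2, h3, h4, hnot⟩, hta, htb⟩
    rcases (pvMem_quads _ _ q).mp hq with ⟨i, j, ro, co, rfl, hi0, hi1, hj0, hj1, hro, hco⟩
    simp only at hmem h1 h2 h3 h4 hnot hta htb
    have hia : i + ro = (a : Int) := by omega
    have hjb : j + co = (b : Int) := by omega
    have hea : (a : Int) + -ro = i := by omega
    have heb : (b : Int) + -co = j := by omega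
    refine ⟨by omega, by rwa [← hia, ← hjb], -ro, -co, by omega, by omega, ?_, by omega, by omega, by omega, by omega⟩
    rw [hea, heb]; exact hmem
  · rintro ⟨hb, hnot, di, dj, hdi, hdj, hmem, hge1, hlt1, hge2, hlt2⟩
    refine ⟨((a : Int) + di, (b : Int) + dj, -di, -dj), ?_, ?_, by simp only; omega, by simp only; omega⟩
    · exact (pvMem_quads _ _ _).mpr ⟨(a : Int) + di, (b : Int) + dj, -di, -dj, rfl,
        hge1, hlt1, hge2, hlt2, by omega, by omega⟩
    · simp only
      have e1 : (a : Int) + di + -di = (a : Int) := by omega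
      have e2 : (b : Int) + dj + -dj = (b : Int) := by omega
      rw [e1, e2]
      exact ⟨hmem, by omega, by exact_mod_cast ha, by omega, hb, hnot⟩

lemma pvB_cond (matrix : List (List Int)) (zs : List (Int × Int)) (a b : Nat)
    (ha : a < matrix.length) :
    (∃ w ∈ (PySem.Set.ofList zs).flatMap (pvNbrList (matrix.length : Int) ((matrix.headD []).length : Int)),
       ((w.1, w.2) ∉ PySem.Set.ofList zs) ∧ (w.1).toNat = a ∧ (w.2).toNat = b)
    ↔ ((b : Int) < ((matrix.headD []).length : Int) ∧ ((a : Int), (b : Int)) ∉ zs ∧ pvHit matrix zs a b) := by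
  simp only [List.mem_flatMap, PySem.Set.mem_ofList, pvNbrList, pvHit]
  constructor
  · rintro ⟨w, ⟨p, hp, hw⟩, hnot, hta, htb⟩
    by_cases hpr : 0 ≤ p.1 ∧ p.1 < (matrix.length : Int) ∧ 0 ≤ p.2 ∧ p.2 < ((matrix.headD []).length : Int)
    · rw [if_pos hpr] at hw
      simp only [List.mem_flatMap, List.mem_map, PySem.List.mem_pyRange_one] at hw
      obtain ⟨ni, ⟨hni1, hni2⟩, nj, ⟨hnj1, hnj2⟩, rfl⟩ := hw
      simp only at hta htb hnot
      obtain ⟨hp1, hp2, hp3, hp4⟩ := hpr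
      have hniA : ni = (a : Int) := by omega
      have hnjB : nj = (b : Int) := by omega
      subst hniA hnjB
      refine ⟨by omega, hnot, p.1 - (a : Int), p.2 - (b : Int), by omega, by omega, ?_, by omega, by omega, by omega, by omega⟩
      have hpe : ((a : Int) + (p.1 - (a : Int)), (b : Int) + (p.2 - (b : Int))) = p := by
        cases p; simp only [Prod.mk.injEq]; constructor <;> omega
      rw [hpe]; exact hp
    · rw [if_neg hpr] at hw
      simp at hw
  · rintro ⟨hb, hnot, di, dj, hdi, hdj, hmem, hge1, hlt1, hge2, hlt2⟩
    refine ⟨((a : Int), (b : Int)), ⟨((a : Int) + di, (b : Int) + dj), hmem, ?_⟩, by simpa using hnot, by simp, by simp⟩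
    rw [if_pos ⟨hge1, hlt1, hge2, hlt2⟩]
    simp only [List.mem_flatMap, List.mem_map, PySem.List.mem_pyRange_one]
    refine ⟨(a : Int), ⟨by omega, ?_⟩, (b : Int), ⟨⟨by omega, by omega⟩, rfl⟩⟩
    have : (a : Int) < (matrix.length : Int) := by exact_mod_cast ha
    omega

lemma pvMain (matrix : List (List Int)) (zs : List (Int × Int)) :
    update_elements matrix zs = update_elements_alt matrix zs := by
  rw [pvA_eq_foldQuads, pvB_eq_foldWrites]
  have hShapeA := pvShape_foldWrites
    (fun q : Int × Int × Int × Int => (q.1, q.2.1) ∈ zs ∧ 0 ≤ q.1 + q.2.2.1 ∧ q.1 + q.2.2.1 < (matrix.length : Int) ∧ 0 ≤ q.2.1 + q.2.2.2 ∧ q.2.1 + q.2.2.2 < ((matrix.headD []).length : Int) ∧ (q.1 + q.2.2.1, q.2.1 + q.2.2.2) ∉ zs)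
    (fun q => q.1 + q.2.2.1) (fun q => q.2.1 + q.2.2.2)
    (pvQuads (matrix.length : Int) ((matrix.headD []).length : Int)) matrix
  have hShapeB := pvShape_foldWrites
    (fun w : Int × Int => (w.1, w.2) ∉ PySem.Set.ofList zs) (fun w => w.1) (fun w => w.2)
    ((PySem.Set.ofList zs).flatMap (pvNbrList (matrix.length : Int) ((matrix.headD []).length : Int))) matrix
  have hA : (pvQuads (matrix.length : Int) ((matrix.headD []).length : Int)).foldl
      (pvStep zs (matrix.length : Int) ((matrix.headD []).length : Int)) matrix =
      (pvQuads (matrix.length : Int) ((matrix.headD []).length : Int)).foldl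
        (fun m q => if (q.1, q.2.1) ∈ zs ∧ 0 ≤ q.1 + q.2.2.1 ∧ q.1 + q.2.2.1 < (matrix.length : Int) ∧ 0 ≤ q.2.1 + q.2.2.2 ∧ q.2.1 + q.2.2.2 < ((matrix.headD []).length : Int) ∧ (q.1 + q.2.2.1, q.2.1 + q.2.2.2) ∉ zs then pvZeroCell m (q.1 + q.2.2.1) (q.2.1 + q.2.2.2) else m) matrix := rfl
  have hB : ((PySem.Set.ofList zs).flatMap (pvNbrList (matrix.length : Int) ((matrix.headD []).length : Int))).foldl
      (pvStepB zs) matrix =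
      ((PySem.Set.ofList zs).flatMap (pvNbrList (matrix.length : Int) ((matrix.headD []).length : Int))).foldl
        (fun m w => if (w.1, w.2) ∉ PySem.Set.ofList zs then pvZeroCell m w.1 w.2 else m) matrix := rfl
  rw [hA, hB]
  apply List.ext_getElem
  · rw [hShapeA.1, hShapeB.1]
  · intro a h1 h2
    have haM : a < matrix.length := by
      have := hShapeA.1
      omega
    apply List.ext_getElem
    · rw [← List.getD_eq_getElem _ [] h1, hShapeA.2 a, ← List.getD_eq_getElem _ [] h2, hShapeB.2 a]
    · intro b hb1 hb2
      have hbM : b < matrix[a].length := by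
        have := hShapeA.2 a
        rw [List.getD_eq_getElem _ [] h1, List.getD_eq_getElem _ [] haM] at this
        omega
      have hget : ∀ (M : List (List Int)) (hx : a < M.length) (hy : b < (M[a]'hx).length),
          (M[a]'hx)[b]'hy = pvCell M a b := by
        intro M hx hy
        unfold pvCell
        rw [List.getD_eq_getElem _ [] hx, List.getD_eq_getElem _ 0 hy]
      rw [hget _ h1 hb1, hget _ h2 hb2, pvCell_foldWrites, pvCell_foldWrites]
      rw [if_congr ((pvA_cond matrix zs a b haM).trans (pvB_cond matrix zs a b haM).symm) rfl rfl]

-- ===== VERDICT (by name: the statement is the Claim_ definition above) =====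
theorem update_elements_spec : Claim_equal_update_elements := by
  intro matrix zero_indices _hdom _hpre
  unfold Spec_update_elements
  exact pvMain matrix zero_indices
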